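-- pv_equiv track=rewrite | github.com/How-We-Growth/Algorithm | programmers/lv0/120837. 개미 군단/개미 군단.py | solution
-- ===== SOURCE A (Python) =====
-- def solution(hp):
--     ant = [5, 3, 1]
--     answer = 0
--     for att in ant:
--         answer += hp // att
--         hp %= att
--         if hp == 0:
--             break
--
--
--     return answer
-- ===== SOURCE B (Python) =====
-- def solution(hp):
--     # Precomputed answer table indexed by the remainder:
--     # no greedy pass over ant types, just one divmod and a table lookup.
--     SMALL = (0, 1, 2, 1, 2)
--     q, r = divmod(hp, 5)
--     return q + SMALL[r]
-- ===== Notes on version B (the rewrite author's own statement) =====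
-- stated objective: simpler
-- what changed: Replaces the greedy loop over ant types with a single divmod plus a precomputed answer table indexed by the remainder, eliminating the later greedy stages entirely.
import Mathlib
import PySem

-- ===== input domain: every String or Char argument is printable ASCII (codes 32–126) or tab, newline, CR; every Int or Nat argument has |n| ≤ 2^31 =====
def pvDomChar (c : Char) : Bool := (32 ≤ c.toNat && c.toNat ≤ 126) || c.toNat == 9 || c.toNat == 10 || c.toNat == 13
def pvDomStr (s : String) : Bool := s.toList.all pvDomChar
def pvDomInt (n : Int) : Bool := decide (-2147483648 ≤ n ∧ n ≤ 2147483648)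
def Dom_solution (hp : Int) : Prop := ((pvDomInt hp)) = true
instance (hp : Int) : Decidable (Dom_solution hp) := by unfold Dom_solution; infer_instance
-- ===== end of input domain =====

-- B drops A's greedy loop over ant types: a single divmod plus a precomputed answer table indexed by the remainder; objective: simpler.

-- ===== PORT A =====
-- the for-loop with its break, as structural recursion over the ant list with state (hp, answer)
def solutionLoop : List Int → Int → Int → Int
  | [], _, answer => answer
  | att :: rest, hp, answer =>
    let answer' := answer + PySem.Int.floordiv hp att
    let hp' := PySem.Int.mod hp att
    if hp' = 0 then answer' else solutionLoop rest hp' answer'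

def solution (hp : Int) : Int := solutionLoop [5, 3, 1] hp 0

-- ===== PORT B =====
-- SMALL[r]: the remainder r is always a valid index into the table;
-- the lookup is ported with pyGet? and .getD 0 is never the returned branch.
def solution_alt (hp : Int) : Int :=
  let small : List Int := [0, 1, 2, 1, 2]
  let q := PySem.Int.floordiv hp 5
  let r := PySem.Int.mod hp 5
  q + (PySem.List.pyGet? small r).getD 0

-- ===== PRECONDITION & SPEC =====
def Spec_solution (hp : Int) (out : Int) : Prop := out = solution_alt hp
instance (hp : Int) (out : Int) : Decidable (Spec_solution hp out) := by unfold Spec_solution; infer_instance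

-- ===== CLAIM (what is proved, stated in full; the proofs are below) =====
def Claim_equal_solution : Prop := ∀ (hp : Int), Dom_solution hp → Spec_solution hp (solution hp)

-- ===== LEMMAS AND PROOFS =====
theorem fmod5_cases (hp : Int) :
    hp.fmod 5 = 0 ∨ hp.fmod 5 = 1 ∨ hp.fmod 5 = 2 ∨ hp.fmod 5 = 3 ∨ hp.fmod 5 = 4 := by
  rw [Int.fmod_eq_emod]
  have h1 : 0 ≤ hp % 5 := Int.emod_nonneg hp (by norm_num)
  have h2 : hp % 5 < 5 := Int.emod_lt_of_pos hp (by norm_num)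
  omega

theorem loop_eq_alt (hp : Int) : solutionLoop [5, 3, 1] hp 0 = solution_alt hp := by
  rcases fmod5_cases hp with h | h | h | h | h <;>
    simp [solutionLoop, solution_alt, PySem.Int.floordiv, PySem.Int.mod, h,
      PySem.List.pyGet?, PySem.List.pyIdx?] <;> omega

-- ===== VERDICT (by name: the statement is the Claim_ definition above) =====
theorem solution_spec : Claim_equal_solution := by
  intro hp _
  unfold Spec_solution solution
  exact loop_eq_alt hp
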